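-- pv_equiv track=rewrite | github.com/internalforces/codingchallenges | 백준/Bronze/2851. 슈퍼 마리오/슈퍼 마리오.py | mario_100
-- ===== SOURCE A (Python) =====
-- def mario_100(scores):
--     mario_score = 0
--     mario_sum = 0
--
--     for score in scores:
--         mario_sum += score
--
--         if mario_sum == 100:
--             return 100
--         elif mario_sum > 100:
--             if abs(100 - mario_sum) < abs(100 - mario_score):
--                 return mario_sum
--             elif abs(100 - mario_sum) == abs(100 - mario_score):
--                 return max(mario_sum, mario_score)
--             else:
--                 return mario_score
--         mario_score = mario_sum
--         # mario_sum이 100을 넘지않으면  mario_score 갱신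
--
--     return mario_score
-- ===== SOURCE B (Python) =====
-- def mario_100(scores):
--     pref = [0]
--     for s in scores:
--         pref.append(pref[-1] + s)
--     for p, c in zip(pref, pref[1:]):
--         if c >= 100:
--             return min(p, c, key=lambda v: (abs(100 - v), -v))
--     return pref[-1]
-- ===== Notes on version B (the rewrite author's own statement) =====
-- stated objective: alternative
-- what changed: Replaces A's single stateful loop with three in-loop return branches by a prefix-sum list, a scan over adjacent (prev, cur) pairs for the first sum reaching 100, and one keyed min (abs(100-v), -v) that subsumes all of A's tie/closeness branches.
import Mathlib
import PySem

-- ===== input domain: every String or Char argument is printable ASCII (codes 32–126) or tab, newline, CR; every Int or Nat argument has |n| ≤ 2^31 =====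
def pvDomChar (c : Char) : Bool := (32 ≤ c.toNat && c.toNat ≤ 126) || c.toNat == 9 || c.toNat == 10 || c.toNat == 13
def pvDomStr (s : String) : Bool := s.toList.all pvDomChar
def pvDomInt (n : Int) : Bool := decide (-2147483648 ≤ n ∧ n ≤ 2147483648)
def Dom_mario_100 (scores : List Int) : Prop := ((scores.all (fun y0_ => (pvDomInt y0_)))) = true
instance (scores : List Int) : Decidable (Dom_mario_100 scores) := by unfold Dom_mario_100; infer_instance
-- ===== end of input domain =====

-- B builds the prefix-sum list and picks the first crossing pair with one keyed min,
-- instead of A's single stateful loop with three in-loop return branches (objective: alternative).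

-- ===== PORT A =====
-- A's for-loop with early returns, carrying (mario_score, mario_sum)
def marioLoop : List Int → Int → Int → Int
  | [], score, _ => score
  | s :: rest, score, sum =>
    let sum' := sum + s
    if sum' = 100 then 100
    else if sum' > 100 then
      if |100 - sum'| < |100 - score| then sum'
      else if |100 - sum'| = |100 - score| then max sum' score
      else score
    else marioLoop rest sum' sum'

def mario_100 (scores : List Int) : Int := marioLoop scores 0 0

-- ===== PORT B =====
-- key comparison for Python's min(p, c, key=lambda v: (abs(100-v), -v)):
-- min returns c exactly when key(c) < key(p) (tuples compared lexicographically)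
def keyLt (u v : Int × Int) : Bool := u.1 < v.1 || (u.1 = v.1 && u.2 < v.2)

-- first pair (p, c) of the zipped list with c >= 100 (B's second for-loop with its return)
def firstCross : List (Int × Int) → Option (Int × Int)
  | [] => none
  | (p, c) :: rest => if c ≥ 100 then some (p, c) else firstCross rest

def mario_100_alt (scores : List Int) : Int :=
  -- pref = [0]; for s in scores: pref.append(pref[-1] + s)
  let pref := scores.foldl (fun acc s => acc ++ [PySem.List.pyGetD acc (-1) 0 + s]) [(0 : Int)]
  -- zip(pref, pref[1:]) and the final return pref[-1]
  match firstCross (pref.zip (PySem.List.slice pref (some 1) none)) with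
  | none => PySem.List.pyGetD pref (-1) 0
  | some (p, c) => if keyLt (|100 - c|, -c) (|100 - p|, -p) then c else p

-- ===== PRECONDITION & SPEC =====
def Spec_mario_100 (scores : List Int) (out : Int) : Prop := out = mario_100_alt scores
instance (scores : List Int) (out : Int) : Decidable (Spec_mario_100 scores out) := by unfold Spec_mario_100; infer_instance

-- ===== CLAIM (what is proved, stated in full; the proofs are below) =====
def Claim_equal_mario_100 : Prop := ∀ (scores : List Int), Dom_mario_100 scores → Spec_mario_100 scores (mario_100 scores)

-- ===== LEMMAS AND PROOFS =====

-- the list of prefix sums starting from running total t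
def prefList (t : Int) : List Int → List Int
  | [] => []
  | s :: r => (t + s) :: prefList (t + s) r

theorem foldl_pref (l : List Int) : ∀ (acc : List Int) (x : Int),
    l.foldl (fun acc s => acc ++ [PySem.List.pyGetD acc (-1) 0 + s]) (acc ++ [x])
      = (acc ++ [x]) ++ prefList x l := by
  induction l with
  | nil => intro acc x; simp [prefList]
  | cons s r ih =>
    intro acc x
    rw [List.foldl_cons, PySem.List.pyGetD_neg_one_append_singleton, ih (acc ++ [x]) (x + s)]
    simp [prefList]

theorem foldl_pref0 (l : List Int) :
    l.foldl (fun acc s => acc ++ [PySem.List.pyGetD acc (-1) 0 + s]) [(0 : Int)]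
      = (0 : Int) :: prefList 0 l := by
  simpa using foldl_pref l [] 0

theorem pyGetD_neg_one_cons_cons (t a : Int) (r : List Int) :
    PySem.List.pyGetD (t :: a :: r) (-1) 0 = PySem.List.pyGetD (a :: r) (-1) 0 := by
  rw [PySem.List.pyGetD_neg_one _ _ (by simp), PySem.List.pyGetD_neg_one _ _ (by simp),
      List.getLast_cons]

-- A's three closeness/tie branches coincide with B's single keyed min at the first crossing
theorem crossCase (t s X : Int) (ht : t < 100) (hge : (100 : Int) ≤ t + s) :
    (if t + s = 100 then (100 : Int)
     else if t + s > 100 then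
       if |100 - (t + s)| < |100 - t| then t + s
       else if |100 - (t + s)| = |100 - t| then max (t + s) t
       else t
     else X)
    = if keyLt (|100 - (t + s)|, -(t + s)) (|100 - t|, -t) then t + s else t := by
  have h1 : |100 - (t + s)| = t + s - 100 := by rw [abs_of_nonpos (by omega)]; ring
  have h2 : |100 - t| = 100 - t := abs_of_nonneg (by omega)
  have hmax : max (t + s) t = t + s := max_eq_left (by omega)
  rw [h1, h2, hmax]
  by_cases hk : (t + s - 100 < 100 - t) ∨ (t + s - 100 = 100 - t ∧ -(t + s) < -t)
  · have : keyLt (t + s - 100, -(t + s)) (100 - t, -t) = true := by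
      simp only [keyLt]; simpa using hk
    rw [this, if_pos rfl]
    split_ifs <;> omega
  · have : keyLt (t + s - 100, -(t + s)) (100 - t, -t) = false := by
      simp only [keyLt]; simpa using hk
    rw [this]
    simp only [Bool.false_eq_true, if_false]
    split_ifs <;> omega

-- B's value when the prefix list starts at running total t
def altFrom (t : Int) (l : List Int) : Int :=
  match firstCross ((t :: prefList t l).zip (prefList t l)) with
  | none => PySem.List.pyGetD (t :: prefList t l) (-1) 0
  | some (p, c) => if keyLt (|100 - c|, -c) (|100 - p|, -p) then c else p

theorem loop_eq_alt (l : List Int) : ∀ t : Int, t < 100 → marioLoop l t t = altFrom t l := by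
  induction l with
  | nil =>
    intro t _
    simp [marioLoop, altFrom, prefList, firstCross, PySem.List.pyGetD_neg_one [t] 0 (by simp)]
  | cons s r ih =>
    intro t ht
    by_cases hge : (100 : Int) ≤ t + s
    · have hfc : firstCross ((t :: prefList t (s :: r)).zip (prefList t (s :: r)))
          = some (t, t + s) := by
        simp [prefList, firstCross, hge]
      unfold altFrom
      rw [hfc]
      show (if t + s = 100 then (100 : Int)
            else if t + s > 100 then
              if |100 - (t + s)| < |100 - t| then t + s
              else if |100 - (t + s)| = |100 - t| then max (t + s) t
              else t
            else marioLoop r (t + s) (t + s))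
          = if keyLt (|100 - (t + s)|, -(t + s)) (|100 - t|, -t) then t + s else t
      exact crossCase t s _ ht hge
    · have hlt : t + s < 100 := by omega
      have hr := ih (t + s) hlt
      show (if t + s = 100 then (100 : Int)
            else if t + s > 100 then
              if |100 - (t + s)| < |100 - t| then t + s
              else if |100 - (t + s)| = |100 - t| then max (t + s) t
              else t
            else marioLoop r (t + s) (t + s))
          = altFrom t (s :: r)
      rw [if_neg (by omega), if_neg (by omega), hr]
      unfold altFrom
      simp only [prefList, List.zip_cons_cons, firstCross,
        if_neg (by omega : ¬ (t + s : Int) ≥ 100)]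
      cases hfc : firstCross (((t + s) :: prefList (t + s) r).zip (prefList (t + s) r)) with
      | none => exact (pyGetD_neg_one_cons_cons t (t + s) (prefList (t + s) r)).symm
      | some pc => cases pc with | mk p c => rfl

-- ===== VERDICT (by name: the statement is the Claim_ definition above) =====
theorem mario_100_spec : Claim_equal_mario_100 := by
  intro scores _
  show mario_100 scores = mario_100_alt scores
  unfold mario_100 mario_100_alt
  rw [foldl_pref0]
  show marioLoop scores 0 0
      = match firstCross (((0 : Int) :: prefList 0 scores).zip
          (PySem.List.slice ((0 : Int) :: prefList 0 scores) (some 1) none)) with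
        | none => PySem.List.pyGetD ((0 : Int) :: prefList 0 scores) (-1) 0
        | some (p, c) => if keyLt (|100 - c|, -c) (|100 - p|, -p) then c else p
  rw [PySem.List.slice_from_one, List.tail_cons]
  exact loop_eq_alt scores 0 (by norm_num)
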